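-- pv_equiv track=rewrite | github.com/eliassondavid/paragrafen-ai | normalize/klarsprak_layer.py | _find_outside_parentheses_and_quotes
-- ===== SOURCE A (Python) =====
-- def _find_outside_parentheses_and_quotes(text: str, delimiter: str) -> int:
--     paren_depth = 0
--     in_quotes = False
--     max_start = len(text) - len(delimiter)
--
--     for idx, char in enumerate(text):
--         if char == '"':
--             in_quotes = not in_quotes
--         elif not in_quotes:
--             if char == "(":
--                 paren_depth += 1
--             elif char == ")" and paren_depth > 0:
--                 paren_depth -= 1
--
--         if idx > max_start:
--             continue
--
--         if paren_depth == 0 and not in_quotes and text.startswith(delimiter, idx):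
--             return idx
--
--     return -1
-- ===== SOURCE B (Python) =====
-- def _find_outside_parentheses_and_quotes(text: str, delimiter: str) -> int:
--     # Pass 1: validity mask; valid[i] = state AFTER consuming text[i] is outside parens/quotes.
--     valid = []
--     depth = 0
--     in_quotes = False
--     for ch in text:
--         if ch == '"':
--             in_quotes = not in_quotes
--         elif not in_quotes:
--             if ch == '(':
--                 depth += 1
--             elif ch == ')' and depth > 0:
--                 depth -= 1
--         valid.append(depth == 0 and not in_quotes)
--     # Pass 2: jump between actual delimiter occurrences via str.find.
--     pos = 0
--     while True:
--         i = text.find(delimiter, pos)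
--         if i == -1 or i >= len(text):
--             return -1
--         if valid[i]:
--             return i
--         pos = i + 1
-- ===== Notes on version B (the rewrite author's own statement) =====
-- stated objective: alternative
-- what changed: A decides everything in one stateful scan that probes startswith at every index; B first builds a validity mask in one pass and then jumps between actual delimiter occurrences with str.find, checking only those against the mask.
import Mathlib
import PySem

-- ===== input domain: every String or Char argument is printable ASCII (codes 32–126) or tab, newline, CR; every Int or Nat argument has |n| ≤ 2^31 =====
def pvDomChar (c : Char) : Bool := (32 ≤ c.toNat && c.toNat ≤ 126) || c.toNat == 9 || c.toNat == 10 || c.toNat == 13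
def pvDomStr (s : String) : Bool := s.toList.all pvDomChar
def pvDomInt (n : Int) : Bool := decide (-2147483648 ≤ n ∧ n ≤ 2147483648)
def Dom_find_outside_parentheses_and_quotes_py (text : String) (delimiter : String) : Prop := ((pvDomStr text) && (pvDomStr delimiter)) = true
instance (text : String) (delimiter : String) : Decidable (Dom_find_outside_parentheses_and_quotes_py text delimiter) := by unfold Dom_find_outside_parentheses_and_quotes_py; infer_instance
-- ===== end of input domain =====

-- B replaces A's single stateful scan with two phases (a validity mask, then a str.find-driven
-- jump between delimiter occurrences); objective: alternative decomposition, same results.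

-- ===== PORT A =====
-- A's state update for one character (the three-branch if of the loop body)
def pvStepA (c : Char) (depth : Int) (inq : Bool) : Int × Bool :=
  if c = '"' then (depth, !inq)
  else if inq then (depth, inq)
  else if c = '(' then (depth + 1, inq)
  else if c = ')' ∧ depth > 0 then (depth - 1, inq)
  else (depth, inq)

-- literal port of A's loop: state update, the `idx > max_start` continue, then the match test
def pvALoop (dl : List Char) (maxStart : Int) : List Char → Nat → Int → Bool → Int
  | [], _, _, _ => -1
  | c :: rest, idx, depth, inq =>
    let s := pvStepA c depth inq
    if (idx : Int) > maxStart then pvALoop dl maxStart rest (idx + 1) s.1 s.2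
    else if s.1 = 0 && !s.2 && dl.isPrefixOf (c :: rest) then (idx : Int)
    else pvALoop dl maxStart rest (idx + 1) s.1 s.2

def find_outside_parentheses_and_quotes_py (text : String) (delimiter : String) : Int :=
  pvALoop delimiter.toList ((text.toList.length : Int) - (delimiter.toList.length : Int))
    text.toList 0 0 false

-- ===== PORT B =====
-- phase 1 of B: the validity mask (state AFTER consuming each char)
def pvStepB (c : Char) (depth : Int) (inq : Bool) : Int × Bool :=
  if c = '"' then (depth, !inq)
  else if inq then (depth, inq)
  else if c = '(' then (depth + 1, inq)
  else if c = ')' ∧ depth > 0 then (depth - 1, inq)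
  else (depth, inq)

def pvBuildValid : List Char → Int → Bool → List Bool
  | [], _, _ => []
  | c :: rest, depth, inq =>
    let s := pvStepB c depth inq
    (decide (s.1 = 0) && !s.2) :: pvBuildValid rest s.1 s.2

-- hand port of Python's text.find(delimiter, pos) for pos ≥ 0 (exact: first i ≥ pos with
-- text[i:i+len(delimiter)] == delimiter, else -1)
def pvFindFrom (tl dl : List Char) (pos : Nat) : Int :=
  if tl.length < pos + dl.length then -1
  else if dl.isPrefixOf (tl.drop pos) then (pos : Int)
  else pvFindFrom tl dl (pos + 1)
termination_by tl.length + 1 - pos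
decreasing_by omega

-- phase 2 of B: the while-True find loop (fuel only makes the Python `while True` structurally
-- recursive; tl.length + 1 fuel is always enough)
def pvBLoop (tl dl : List Char) (valid : List Bool) : Nat → Nat → Int
  | _, 0 => -1
  | pos, fuel + 1 =>
    let i := pvFindFrom tl dl pos
    if i = -1 ∨ (tl.length : Int) ≤ i then -1
    else if valid.getD i.toNat false then i
    else pvBLoop tl dl valid (i.toNat + 1) fuel

def find_outside_parentheses_and_quotes_py_alt (text : String) (delimiter : String) : Int :=
  pvBLoop text.toList delimiter.toList (pvBuildValid text.toList 0 false) 0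
    (text.toList.length + 1)

-- ===== PRECONDITION & SPEC =====
def Spec_find_outside_parentheses_and_quotes_py (text : String) (delimiter : String) (out : Int) : Prop := out = find_outside_parentheses_and_quotes_py_alt text delimiter
instance (text : String) (delimiter : String) (out : Int) : Decidable (Spec_find_outside_parentheses_and_quotes_py text delimiter out) := by unfold Spec_find_outside_parentheses_and_quotes_py; infer_instance

-- ===== CLAIM (what is proved, stated in full; the proofs are below) =====
def Claim_equal_find_outside_parentheses_and_quotes_py : Prop := ∀ (text : String) (delimiter : String), Dom_find_outside_parentheses_and_quotes_py text delimiter → Spec_find_outside_parentheses_and_quotes_py text delimiter (find_outside_parentheses_and_quotes_py text delimiter)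

-- ===== LEMMAS AND PROOFS =====

-- A with the (redundant) skip branch removed
def pvScan (dl : List Char) : List Char → Nat → Int → Bool → Int
  | [], _, _, _ => -1
  | c :: rest, idx, depth, inq =>
    let s := pvStepA c depth inq
    if s.1 = 0 && !s.2 && dl.isPrefixOf (c :: rest) then (idx : Int)
    else pvScan dl rest (idx + 1) s.1 s.2

-- index-driven first-hit search over the whole lists
def pvScanIdx (tl dl : List Char) (valid : List Bool) (pos : Nat) : Int :=
  if pos < tl.length then
    if valid.getD pos false && dl.isPrefixOf (tl.drop pos) then (pos : Int)
    else pvScanIdx tl dl valid (pos + 1)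
  else -1
termination_by tl.length - pos
decreasing_by omega

lemma prefix_len {dl l : List Char} (h : dl.isPrefixOf l) : dl.length ≤ l.length :=
  (List.isPrefixOf_iff_prefix.mp h).length_le

lemma pvALoop_eq_scan (dl : List Char) (ms : Int) :
    ∀ (l : List Char) (idx : Nat) (depth : Int) (inq : Bool),
      (idx : Int) + l.length = ms + dl.length →
      pvALoop dl ms l idx depth inq = pvScan dl l idx depth inq := by
  intro l
  induction l with
  | nil => intro idx depth inq _; rfl
  | cons c rest ih =>
    intro idx depth inq h
    simp only [List.length_cons] at h
    have hrec := ih (idx + 1) (pvStepA c depth inq).1 (pvStepA c depth inq).2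
      (by push_cast at h ⊢; omega)
    simp only [pvALoop, pvScan]
    by_cases hskip : (idx : Int) > ms
    · have hnp : ¬ dl.isPrefixOf (c :: rest) := by
        intro hp
        have := prefix_len hp
        simp only [List.length_cons] at this
        push_cast at h
        omega
      rw [if_pos hskip, if_neg (by simp [hnp]), hrec]
    · rw [if_neg hskip]
      split
      · rfl
      · exact hrec

lemma pvScan_eq_scanV (dl : List Char) :
    ∀ (l : List Char) (idx : Nat) (depth : Int) (inq : Bool) (tl : List Char) (valid : List Bool),
      tl.drop idx = l → valid.drop idx = pvBuildValid l depth inq →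
      pvScan dl l idx depth inq = pvScanIdx tl dl valid idx := by
  intro l
  induction l with
  | nil =>
    intro idx depth inq tl valid hd _
    have : tl.length ≤ idx := by
      have := congrArg List.length hd; simp at this; omega
    rw [pvScan, pvScanIdx, if_neg (by omega)]
  | cons c rest ih =>
    intro idx depth inq tl valid hd hv
    have hlt : idx < tl.length := by
      have := congrArg List.length hd; simp at this; omega
    have hget : valid.getD idx false
        = (decide ((pvStepA c depth inq).1 = 0) && !(pvStepA c depth inq).2) := by
      have h0 : valid[idx]? = (valid.drop idx)[0]? := by
        rw [List.getElem?_drop]; simp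
      rw [hv] at h0
      simp only [pvBuildValid, List.getElem?_cons_zero] at h0
      simp only [List.getD, h0, Option.getD_some]
      rfl
    rw [pvScan, pvScanIdx, if_pos hlt, hd, hget]
    split
    · rfl
    · apply ih (idx + 1)
      · rw [← List.tail_drop, hd]; rfl
      · rw [← List.tail_drop, hv]; rfl

lemma pvScanIdx_skip (tl dl : List Char) (valid : List Bool) (pos : Nat)
    (hnp : ¬ dl.isPrefixOf (tl.drop pos)) :
    pvScanIdx tl dl valid pos = pvScanIdx tl dl valid (pos + 1) := by
  rw [pvScanIdx]
  split
  · simp [hnp]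
  · rename_i h
    rw [pvScanIdx, if_neg (by omega)]

lemma pvScanIdx_neg_aux (tl dl : List Char) (valid : List Bool) (pos : Nat)
    (h : tl.length < pos + dl.length) : pvScanIdx tl dl valid pos = -1 := by
  rw [pvScanIdx]
  split
  · rename_i hlt
    have hnp : ¬ dl.isPrefixOf (tl.drop pos) := by
      intro hp
      have := prefix_len hp
      simp at this; omega
    rw [if_neg (by simp [hnp])]
    exact pvScanIdx_neg_aux tl dl valid (pos + 1) (by omega)
  · rfl
termination_by tl.length + 1 - pos
decreasing_by omega

-- characterization of pvFindFrom against pvScanIdx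
lemma pvFindFrom_ge (tl dl : List Char) (pos : Nat) : -1 ≤ pvFindFrom tl dl pos := by
  rw [pvFindFrom]
  split
  · omega
  · split
    · omega
    · exact pvFindFrom_ge tl dl (pos + 1)
termination_by tl.length + 1 - pos
decreasing_by omega

lemma pvFindFrom_key (tl dl : List Char) (valid : List Bool) (pos : Nat) :
      (pvFindFrom tl dl pos = -1 → pvScanIdx tl dl valid pos = -1) ∧
      (∀ n : Nat, pvFindFrom tl dl pos = (n : Int) →
        pvScanIdx tl dl valid pos = pvScanIdx tl dl valid n ∧ pos ≤ n ∧
        dl.isPrefixOf (tl.drop n) ∧ n + dl.length ≤ tl.length) := by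
  rw [pvFindFrom]
  split
  · rename_i hlen
    refine ⟨fun _ => pvScanIdx_neg_aux tl dl valid pos hlen, fun n hn => absurd hn (by omega)⟩
  · rename_i hlen
    split
    · rename_i hp
      refine ⟨fun h => absurd h (by omega), fun n hn => ?_⟩
      have hpn : pos = n := by exact_mod_cast hn
      subst hpn
      exact ⟨rfl, le_refl _, hp, by omega⟩
    · rename_i hp
      obtain ⟨h1, h2⟩ := pvFindFrom_key tl dl valid (pos + 1)
      have hskip := pvScanIdx_skip tl dl valid pos hp
      refine ⟨fun h => hskip.trans (h1 h), fun n hn => ?_⟩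
      obtain ⟨he, hle, hpre, hl⟩ := h2 n hn
      exact ⟨hskip.trans he, by omega, hpre, hl⟩
termination_by tl.length + 1 - pos
decreasing_by omega

lemma pvBLoop_eq_scanIdx (tl dl : List Char) (valid : List Bool) :
    ∀ (fuel pos : Nat), tl.length + 1 ≤ fuel + pos →
      pvBLoop tl dl valid pos fuel = pvScanIdx tl dl valid pos := by
  intro fuel
  induction fuel with
  | zero =>
    intro pos h
    rw [pvBLoop, pvScanIdx, if_neg (by omega)]
  | succ fuel ih =>
    intro pos h
    rw [pvBLoop]
    obtain ⟨hneg, hpos⟩ := pvFindFrom_key tl dl valid pos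
    by_cases hi1 : pvFindFrom tl dl pos = -1
    · rw [hi1, if_pos (Or.inl rfl)]
      exact (hneg hi1).symm
    · have h0 : 0 ≤ pvFindFrom tl dl pos := by
        have := pvFindFrom_ge tl dl pos
        omega
      lift pvFindFrom tl dl pos to ℕ using h0 with n hn
      obtain ⟨heq, hle, hp, hlen⟩ := hpos n rfl
      clear hn hneg hpos hi1
      by_cases hn2 : tl.length ≤ n
      · rw [if_pos (Or.inr (by exact_mod_cast hn2)), heq, pvScanIdx, if_neg (by omega)]
      · rw [if_neg (by omega), heq, pvScanIdx, if_pos (show n < tl.length by omega)]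
        simp only [Int.toNat_natCast, hp, Bool.and_true]
        split
        · rfl
        · exact ih (n + 1) (by omega)

-- ===== VERDICT (by name: the statement is the Claim_ definition above) =====
theorem find_outside_parentheses_and_quotes_py_spec : Claim_equal_find_outside_parentheses_and_quotes_py := by
  intro text delimiter _
  unfold Spec_find_outside_parentheses_and_quotes_py
  unfold find_outside_parentheses_and_quotes_py find_outside_parentheses_and_quotes_py_alt
  rw [pvALoop_eq_scan delimiter.toList _ text.toList 0 0 false (by push_cast; ring),
    pvScan_eq_scanV delimiter.toList text.toList 0 0 false text.toList
      (pvBuildValid text.toList 0 false) rfl rfl,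
    pvBLoop_eq_scanIdx text.toList delimiter.toList (pvBuildValid text.toList 0 false)
      (text.toList.length + 1) 0 (by omega)]
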